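-- pv_equiv track=rewrite | github.com/ShuvalovAnthony/ege | 25/20907.py | f
-- ===== SOURCE A (Python) =====
-- def f(s1, s2, step=1): # 1p 2v 3p 4v 5p
--     if (step == 3 and (s1 + s2 >= 81)): return True
--     if (
--         (step == 3 and (s1 + s2 < 81)) or
--         (step < 3 and (s1 + s2 >= 81))
--     ):
--         return False
--
--
--     moves = [
--         f(s1 + 1, s2, step + 1),
--         f(s1, s2 + 1, step + 1),
--         f(s1*2, s2, step + 1),
--         f(s1, s2*2, step + 1),
--     ]
--
--     if step%2 == 0:
--         return any(moves)
--     return any(moves)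
-- ===== SOURCE B (Python) =====
-- def f(s1, s2, step=1):
--     # Level-by-level breadth-first expansion instead of recursion.
--     if s1 + s2 >= 81:
--         return step == 3
--     if step == 3:
--         return False
--     states = [(s1, s2)]
--     for _ in range(step, 2):
--         states = [m for (a, b) in states
--                     for m in ((a + 1, b), (a, b + 1), (a * 2, b), (a, b * 2))
--                     if m[0] + m[1] < 81]
--     return any(c + d >= 81 for (a, b) in states
--                            for (c, d) in ((a + 1, b), (a, b + 1), (a * 2, b), (a, b * 2)))
-- ===== Notes on version B (the rewrite author's own statement) =====
-- stated objective: alternative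
-- what changed: Replaces A's four-way depth-first recursion with an iterative level-by-level (breadth-first) expansion: a state list is expanded one ply at a time with the sum>=81 prune applied to intermediate plies, and the final ply is checked for any winning state.
import Mathlib
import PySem

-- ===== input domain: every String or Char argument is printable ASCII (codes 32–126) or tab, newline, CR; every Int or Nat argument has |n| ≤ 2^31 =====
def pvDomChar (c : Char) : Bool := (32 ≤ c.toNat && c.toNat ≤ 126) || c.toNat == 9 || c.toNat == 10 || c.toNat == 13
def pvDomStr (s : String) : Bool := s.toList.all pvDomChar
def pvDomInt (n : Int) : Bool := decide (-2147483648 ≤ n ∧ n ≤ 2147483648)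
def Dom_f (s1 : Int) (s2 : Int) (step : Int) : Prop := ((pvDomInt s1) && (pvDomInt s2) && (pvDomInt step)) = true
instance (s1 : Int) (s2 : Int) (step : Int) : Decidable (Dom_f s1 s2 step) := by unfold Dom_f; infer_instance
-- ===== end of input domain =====

-- B replaces A's depth-first recursion by an iterative level-by-level expansion (simpler decomposition, same cost).

-- ===== PORT A =====
-- fuel = (4 - step).toNat bounds the recursion depth; under Pre_f (step ≤ 3) the fuel
-- never runs out, so fAux transcribes A's body step for step.
def fAux : Nat → Int → Int → Int → Bool
  | 0, _, _, _ => false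
  | n + 1, s1, s2, step =>
    if step == 3 && decide (s1 + s2 ≥ 81) then true
    else if (step == 3 && decide (s1 + s2 < 81)) || (decide (step < 3) && decide (s1 + s2 ≥ 81)) then false
    else
      let moves := [fAux n (s1 + 1) s2 (step + 1),
                    fAux n s1 (s2 + 1) (step + 1),
                    fAux n (s1 * 2) s2 (step + 1),
                    fAux n s1 (s2 * 2) (step + 1)]
      if PySem.Int.mod step 2 == 0 then moves.any id else moves.any id

def f (s1 : Int) (s2 : Int) (step : Int) : Bool := fAux (4 - step).toNat s1 s2 step

-- ===== PORT B =====
def movesB (a : Int) (b : Int) : List (Int × Int) := [(a + 1, b), (a, b + 1), (a * 2, b), (a, b * 2)]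

def f_alt (s1 : Int) (s2 : Int) (step : Int) : Bool :=
  if decide (s1 + s2 ≥ 81) then step == 3
  else if step == 3 then false
  else
    let states := (PySem.List.pyRange step 2 1).foldl
      (fun sts _ => sts.flatMap (fun p => (movesB p.1 p.2).filter (fun m => decide (m.1 + m.2 < 81))))
      [(s1, s2)]
    states.any (fun p => (movesB p.1 p.2).any (fun m => decide (m.1 + m.2 ≥ 81)))

-- ===== PRECONDITION & SPEC =====
-- Pre_f excludes only step > 3, where A's recursion never reaches a terminating branch
-- and raises RecursionError.
def Pre_f (s1 : Int) (s2 : Int) (step : Int) : Prop := step ≤ 3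
instance (s1 : Int) (s2 : Int) (step : Int) : Decidable (Pre_f s1 s2 step) := by unfold Pre_f; infer_instance
def pvWitness_f : Int × Int × Int := (40, 40, 1)

def Spec_f (s1 : Int) (s2 : Int) (step : Int) (out : Bool) : Prop := out = f_alt s1 s2 step
instance (s1 : Int) (s2 : Int) (step : Int) (out : Bool) : Decidable (Spec_f s1 s2 step out) := by unfold Spec_f; infer_instance

-- ===== CLAIM (what is proved, stated in full; the proofs are below) =====
def Claim_equal_f : Prop := ∀ (s1 : Int) (s2 : Int) (step : Int), Dom_f s1 s2 step → Pre_f s1 s2 step → Spec_f s1 s2 step (f s1 s2 step)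

-- ===== LEMMAS AND PROOFS =====
-- B's one-ply expansion (expand each state by the four moves, keep sums < 81)
def expandB (sts : List (Int × Int)) : List (Int × Int) :=
  sts.flatMap (fun p => (movesB p.1 p.2).filter (fun m => decide (m.1 + m.2 < 81)))

theorem any_congr_mem {α : Type} (l : List α) (p q : α → Bool) (h : ∀ x ∈ l, p x = q x) :
    l.any p = l.any q := by
  induction l with
  | nil => rfl
  | cons a t ih => simp_all

theorem any_flatMap {α β : Type} (l : List α) (g : α → List β) (q : β → Bool) :
    (l.flatMap g).any q = l.any (fun a => (g a).any q) := by
  induction l with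
  | nil => rfl
  | cons a t ih => simp [List.flatMap_cons, List.any_append, ih]

-- B's fold over range(step, 2) ignores the loop variable: it is expandB iterated
theorem foldl_const_expand (l : List Int) (init : List (Int × Int)) :
    l.foldl (fun sts _ => sts.flatMap
        (fun p => (movesB p.1 p.2).filter (fun m => decide (m.1 + m.2 < 81)))) init
      = expandB^[l.length] init := by
  induction l generalizing init with
  | nil => rfl
  | cons a t ih => simp [List.foldl_cons, ih, Function.iterate_succ_apply, expandB]

theorem mem_expandB (sts : List (Int × Int)) (p : Int × Int) (hp : p ∈ expandB sts) :
    p.1 + p.2 < 81 := by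
  simp [expandB, List.mem_flatMap, List.mem_filter] at hp
  obtain ⟨_, _, _, h⟩ := hp
  omega

-- A's recursion at a pre-final ply on an already-won pile: the prune returns False
theorem fAux_lose (n : Nat) (a b st : Int) (hst : st < 3) (h : 81 ≤ a + b) :
    fAux (n + 1) a b st = false := by
  have hne : ¬ st = 3 := by omega
  simp [fAux, hne, hst, h]

-- one unfolding of A's recursion at a live pre-final ply
theorem fAux_expand (n : Nat) (a b st : Int) (hst : st < 3) (h : a + b < 81) :
    fAux (n + 1) a b st = (movesB a b).any (fun m => fAux n m.1 m.2 (st + 1)) := by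
  have hne : ¬ st = 3 := by omega
  have h' : ¬ 81 ≤ a + b := by omega
  simp [fAux, hne, hst, h', movesB]

-- A's middle level (step = 2): the pruning test, then one look-ahead over the four moves
theorem fAux_two (a b : Int) :
    fAux 2 a b 2 = (decide (a + b < 81) && (movesB a b).any (fun m => decide (m.1 + m.2 ≥ 81))) := by
  by_cases h : a + b < 81 <;> simp [fAux, movesB, h]

-- the level invariant: k more pruned expansions followed by the final-ply check
-- compute exactly A's recursion of depth k+2 started at ply 2-k, on any live state list
theorem level_inv (k : Nat) (sts : List (Int × Int)) (hs : ∀ p ∈ sts, p.1 + p.2 < 81) :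
    (expandB^[k] sts).any (fun p => (movesB p.1 p.2).any (fun m => decide (m.1 + m.2 ≥ 81)))
      = sts.any (fun p => fAux (k + 2) p.1 p.2 (2 - (k : Int))) := by
  induction k generalizing sts with
  | zero =>
    refine any_congr_mem _ _ _ (fun p hp => ?_)
    have h := hs p hp
    norm_num
    rw [fAux_two]
    simp [h]
  | succ k ih =>
    rw [Function.iterate_succ_apply, ih (expandB sts) (fun p hp => mem_expandB sts p hp)]
    unfold expandB
    rw [any_flatMap]
    refine (any_congr_mem _ _ _ (fun p hp => ?_)).symm
    have hlt : (2 : Int) - ((k : Int) + 1) < 3 := by omega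
    have e1 : k + 1 + 2 = (k + 2) + 1 := rfl
    push_cast
    rw [e1, fAux_expand (k + 2) p.1 p.2 _ hlt (hs p hp),
        show ((2 : Int) - ((k : Int) + 1)) + 1 = 2 - (k : Int) by ring, List.any_filter]
    refine any_congr_mem _ _ _ (fun m _ => ?_)
    by_cases hm : m.1 + m.2 < 81
    · simp [hm]
    · have h81 : 81 ≤ m.1 + m.2 := by omega
      have hlt2 : (2 : Int) - (k : Int) < 3 := by omega
      rw [show k + 2 = (k + 1) + 1 by omega, fAux_lose (k + 1) m.1 m.2 _ hlt2 h81]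
      simp [hm]

-- ===== VERDICT (by name: the statement is the Claim_ definition above) =====
theorem f_spec : Claim_equal_f := by
  intro s1 s2 step _ hpre
  show f s1 s2 step = f_alt s1 s2 step
  by_cases h3 : step = 3
  · subst h3
    show fAux 1 s1 s2 3 = _
    by_cases h : s1 + s2 < 81 <;> simp [fAux, f_alt, h]
  · have hlt : step < 3 := by
      have : step ≤ 3 := hpre
      omega
    by_cases h : s1 + s2 < 81
    · -- live start: A recurses, B iterates (2 - step) pruned expansions then checks
      have hk : (4 - step).toNat = (2 - step).toNat + 2 := by omega
      have hB : f_alt s1 s2 step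
          = (expandB^[(2 - step).toNat] [(s1, s2)]).any
              (fun p => (movesB p.1 p.2).any (fun m => decide (m.1 + m.2 ≥ 81))) := by
        simp only [f_alt]
        rw [if_neg (by simp; omega), if_neg (by simp [h3]),
            foldl_const_expand, PySem.List.length_pyRange_one]
      rw [hB, level_inv (2 - step).toNat [(s1, s2)] (by simp [h])]
      have h2 : (((2 - step).toNat : Int)) = 2 - step := by omega
      simp only [List.any_cons, List.any_nil, Bool.or_false, h2]
      rw [show (2 : Int) - (2 - step) = step by ring]
      show fAux (4 - step).toNat s1 s2 step = _
      rw [hk]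
    · -- start already ≥ 81 before the final ply: both sides say False
      have h81 : 81 ≤ s1 + s2 := by omega
      have hk : (4 - step).toNat = (3 - step).toNat + 1 := by omega
      show fAux (4 - step).toNat s1 s2 step = _
      rw [hk, fAux_lose _ _ _ _ hlt h81]
      simp [f_alt, h81, h3]
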